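-- pv_equiv track=rewrite | github.com/Dibyas83/masai | dsa/problems/kth ele by insertionsort.py | insertion_sort_with_kth_position
-- ===== SOURCE A (Python) =====
-- def insertion_sort_with_kth_position(arr, k):
--     n = len(arr)
--     kth_element = arr[k]
--     smaller_count = 0
--     for y in arr[0:k]:
--         if y == kth_element:
--             smaller_count += 1
--
--     # Perform insertion sort
--     for i in range(1, n):
--         key = arr[i]
--         j = i - 1
--         while j >= 0 and key < arr[j]:
--             arr[j + 1] = arr[j]
--             j -= 1
--         arr[j + 1] = key
--
--     # Find the position of the k-th element
--     #kth_element = arr[k]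
--     #smaller_count = 0
--     for x in arr:
--         if x < kth_element:
--             smaller_count += 1
--
--     return smaller_count
-- ===== SOURCE B (Python) =====
-- def insertion_sort_with_kth_position(arr, k):
--     kth = arr[k]
--     count = arr[:k].count(kth)
--     arr.sort()
--     lo, hi = 0, len(arr)
--     while lo < hi:
--         mid = (lo + hi) // 2
--         if arr[mid] < kth:
--             lo = mid + 1
--         else:
--             hi = mid
--     return count + lo
-- ===== Notes on version B (the rewrite author's own statement) =====
-- stated objective: faster
-- what changed: Replaces the hand-written O(n^2) insertion sort plus final linear rescan by the builtin O(n log n) sort plus a hand-rolled binary search (bisect_left) for the less-than count, with the equal-count taken from the original prefix via list.count.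
import Mathlib
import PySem

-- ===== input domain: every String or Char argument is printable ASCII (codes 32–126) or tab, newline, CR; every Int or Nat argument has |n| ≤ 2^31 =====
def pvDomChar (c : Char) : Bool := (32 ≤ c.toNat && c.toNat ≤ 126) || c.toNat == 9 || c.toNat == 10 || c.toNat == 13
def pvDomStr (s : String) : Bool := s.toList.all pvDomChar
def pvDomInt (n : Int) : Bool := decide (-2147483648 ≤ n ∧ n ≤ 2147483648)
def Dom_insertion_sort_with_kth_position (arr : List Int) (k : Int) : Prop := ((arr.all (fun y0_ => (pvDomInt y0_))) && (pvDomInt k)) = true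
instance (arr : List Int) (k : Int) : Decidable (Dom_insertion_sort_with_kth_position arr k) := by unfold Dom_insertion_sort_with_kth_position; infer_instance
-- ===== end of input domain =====

-- B replaces A's hand-written insertion sort + final linear rescan by the builtin sort + a
-- binary search for the less-than count (measured faster). Both Pythons sort `arr` in place
-- to the same final list; the equivalence proved here is about the RETURN value.

-- ===== PORT A =====
-- the inner `while j >= 0 and key < arr[j]` loop; returns (mutated arr, final j)
def pvInsWhile (a : List Int) (key : Int) (j : Int) : List Int × Int :=
  if h : 0 ≤ j ∧ key < PySem.List.pyGetD a j 0 then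
    pvInsWhile (PySem.List.pySetD a (j + 1) (PySem.List.pyGetD a j 0)) key (j - 1)
  else (a, j)
termination_by (j + 1).toNat
decreasing_by omega

-- one iteration of `for i in range(1, n)`
def pvInsStep (a : List Int) (i : Int) : List Int :=
  let key := PySem.List.pyGetD a i 0
  let p := pvInsWhile a key (i - 1)
  PySem.List.pySetD p.1 (p.2 + 1) key

def insertion_sort_with_kth_position (arr : List Int) (k : Int) : Int :=
  let n := PySem.List.len arr
  match PySem.List.pyGet? arr k with
  | none => 0   -- arr[k] raises IndexError: excluded by Pre_
  | some kth =>
    let sc : Int := (PySem.List.slice arr (some 0) (some k)).foldl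
        (fun c y => if y == kth then c + 1 else c) 0
    let a2 := (PySem.List.pyRange 1 n 1).foldl pvInsStep arr
    a2.foldl (fun c x => if x < kth then c + 1 else c) sc

-- ===== PORT B =====
-- the hand-rolled bisect_left `while lo < hi` loop of Source B
def pvBisect (l : List Int) (x : Int) (lo hi : Int) : Int :=
  if _h : lo < hi then
    let mid := PySem.Int.floordiv (lo + hi) 2
    if PySem.List.pyGetD l mid 0 < x then pvBisect l x (mid + 1) hi
    else pvBisect l x lo mid
  else lo
termination_by (hi - lo).toNat
decreasing_by
  · have hb := PySem.Int.floordiv_two_mid_bounds (le_of_lt _h)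
    omega
  · have _hb2 := PySem.Int.floordiv_two_mid_bounds (le_of_lt _h)
    have hlt : PySem.Int.floordiv (lo + hi) 2 < hi :=
      (PySem.Int.floordiv_lt_iff_lt_mul (by omega)).2 (by omega)
    omega

def insertion_sort_with_kth_position_alt (arr : List Int) (k : Int) : Int :=
  match PySem.List.pyGet? arr k with
  | none => 0   -- arr[k] raises IndexError: excluded by Pre_
  | some kth =>
    let count : Int := PySem.List.count (PySem.List.slice arr none (some k)) kth
    let s := PySem.List.sorted arr id false
    count + pvBisect s kth 0 (PySem.List.len s)

-- ===== PRECONDITION & SPEC =====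
-- Pre_ excludes exactly the inputs where Python A raises IndexError on `arr[k]`.
def Pre_insertion_sort_with_kth_position (arr : List Int) (k : Int) : Prop :=
  PySem.Raise.InRange arr.length k
instance (arr : List Int) (k : Int) : Decidable (Pre_insertion_sort_with_kth_position arr k) := by
  unfold Pre_insertion_sort_with_kth_position; infer_instance
def pvWitness_insertion_sort_with_kth_position : List Int × Int := ([3, 1, 2], 1)

def Spec_insertion_sort_with_kth_position (arr : List Int) (k : Int) (out : Int) : Prop := out = insertion_sort_with_kth_position_alt arr k
instance (arr : List Int) (k : Int) (out : Int) : Decidable (Spec_insertion_sort_with_kth_position arr k out) := by unfold Spec_insertion_sort_with_kth_position; infer_instance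

-- ===== CLAIM (what is proved, stated in full; the proofs are below) =====
def Claim_equal_insertion_sort_with_kth_position : Prop := ∀ (arr : List Int) (k : Int), Dom_insertion_sort_with_kth_position arr k → Pre_insertion_sort_with_kth_position arr k → Spec_insertion_sort_with_kth_position arr k (insertion_sort_with_kth_position arr k)

-- ===== LEMMAS AND PROOFS =====

-- shifting a[j] into slot j+1 and then writing `key` at slot j permutes writing `key` at slot j+1
theorem pv_swap_perm (a : List Int) (j : Nat) (key : Int) (hj : j + 1 < a.length) :
    ((a.set (j + 1) (a.getD j 0)).set j key).Perm (a.set (j + 1) key) := by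
  induction a generalizing j with
  | nil => simp at hj
  | cons x t ih =>
    cases j with
    | zero =>
      cases t with
      | nil => simp at hj
      | cons y u => simpa using List.Perm.swap x key u
    | succ m =>
      simp only [List.set_cons_succ, List.getD_cons_succ]
      exact .cons x (ih m (by simpa using hj))

-- the while loop, followed by the pending `arr[j+1] = key` write, permutes a single write at j+1
theorem pvInsWhile_perm (a : List Int) (key : Int) (j : Int) (hj : -1 ≤ j)
    (hlen : (j + 1).toNat < a.length) :
    -1 ≤ (pvInsWhile a key j).2 ∧ (pvInsWhile a key j).1.length = a.length ∧
      ((pvInsWhile a key j).1.set ((pvInsWhile a key j).2 + 1).toNat key).Perm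
        (a.set (j + 1).toNat key) := by
  fun_induction pvInsWhile a key j with
  | case1 a j h ih =>
    obtain ⟨hj0, hlt⟩ := h
    have hjlen : j.toNat < a.length := by omega
    have ha' : PySem.List.pySetD a (j + 1) (PySem.List.pyGetD a j 0)
        = a.set (j + 1).toNat (a.getD j.toNat 0) := by
      rw [PySem.List.pySetD_of_nonneg _ _ (by omega), PySem.List.pyGetD_eq_getElem _ _ hj0 (by omega),
        List.getD_eq_getElem _ _ hjlen]
    rw [ha'] at ih ⊢
    have hlen' : (j - 1 + 1).toNat < (a.set (j + 1).toNat (a.getD j.toNat 0)).length := by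
      simpa using by omega
    obtain ⟨h1, h2, h3⟩ := ih (by omega) hlen'
    refine ⟨h1, by simpa using h2, ?_⟩
    have heq : (j - 1 + 1).toNat = j.toNat := by omega
    have heq2 : (j + 1).toNat = j.toNat + 1 := by omega
    rw [heq] at h3
    refine h3.trans ?_
    rw [heq2]
    exact pv_swap_perm a j.toNat key (by omega)
  | case2 a j h => exact ⟨hj, rfl, .refl _⟩

theorem pvInsStep_perm (a : List Int) (i : Int) (h0 : 0 ≤ i) (hi : i.toNat < a.length) :
    (pvInsStep a i).Perm a := by
  show (PySem.List.pySetD (pvInsWhile a (PySem.List.pyGetD a i 0) (i-1)).1 ((pvInsWhile a (PySem.List.pyGetD a i 0) (i-1)).2 + 1) (PySem.List.pyGetD a i 0)).Perm a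
  obtain ⟨h1, h2, h3⟩ := pvInsWhile_perm a (PySem.List.pyGetD a i 0) (i - 1) (by omega)
    (by simpa using by omega)
  rw [PySem.List.pySetD_of_nonneg _ _ (by omega)]
  refine h3.trans ?_
  have : (i - 1 + 1).toNat = i.toNat := by omega
  rw [this, PySem.List.pyGetD_eq_getElem _ _ h0 (by omega), List.set_getElem_self]

theorem pvInsFold_perm (l : List Int) (acc : List Int)
    (hl : ∀ i ∈ l, 0 ≤ i ∧ i.toNat < acc.length) :
    (l.foldl pvInsStep acc).Perm acc := by
  induction l generalizing acc with
  | nil => simp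
  | cons i t ih =>
    simp only [List.foldl_cons]
    have hi := hl i (by simp)
    have hstep := pvInsStep_perm acc i hi.1 hi.2
    refine (ih _ (fun x hx => ?_)).trans hstep
    exact ⟨(hl x (by simp [hx])).1, by rw [hstep.length_eq]; exact (hl x (by simp [hx])).2⟩

-- a list whose first m positions satisfy p and the rest do not has countP = m
theorem pv_countP_split (p : Int → Bool) (l : List Int) (m : Nat) (hm : m ≤ l.length)
    (h1 : ∀ i, i < m → p (l.getD i 0)) (h2 : ∀ i, m ≤ i → i < l.length → ¬ p (l.getD i 0)) :
    l.countP p = m := by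
  have ht : (l.take m).countP p = (l.take m).length := by
    rw [List.countP_eq_length]
    intro y hy
    obtain ⟨i, hi, rfl⟩ := List.mem_iff_getElem.1 hy
    have him : i < m := by simpa using (List.length_take .. ▸ hi : i < min m l.length).trans_le (by omega)
    have hil : i < l.length := by omega
    have := h1 i him
    rw [List.getD_eq_getElem _ _ hil] at this
    simpa [List.getElem_take] using this
  have hd : (l.drop m).countP p = 0 := by
    rw [List.countP_eq_zero]
    intro y hy
    obtain ⟨i, hi, rfl⟩ := List.mem_iff_getElem.1 hy
    have hlen : i < l.length - m := by simpa using hi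
    have := h2 (m + i) (by omega) (by omega)
    rw [List.getD_eq_getElem _ _ (by omega)] at this
    simpa [List.getElem_drop] using this
  calc l.countP p = (l.take m ++ l.drop m).countP p := by rw [List.take_append_drop]
    _ = m := by rw [List.countP_append, ht, hd]; simp [List.length_take]; omega

-- the binary search of Source B computes the number of elements below x in a sorted list
theorem pvBisect_eq_countP (l : List Int) (x : Int)
    (hs : l.Pairwise (fun a b => a ≤ b)) : ∀ (lo hi : Int),
    0 ≤ lo → lo ≤ hi → hi ≤ l.length →
    (∀ i : Nat, i < lo.toNat → l.getD i 0 < x) →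
    (∀ i : Nat, hi.toNat ≤ i → i < l.length → ¬ l.getD i 0 < x) →
    pvBisect l x lo hi = l.countP (fun y => decide (y < x)) := by
  have hs' := List.pairwise_iff_getElem.1 hs
  intro lo hi
  fun_induction pvBisect l x lo hi with
  | case1 lo hi h mid hc ih =>
    intro h0 hlh hhi hinv1 hinv2
    have hb : lo ≤ mid ∧ mid ≤ hi := PySem.Int.floordiv_two_mid_bounds (le_of_lt h)
    have hlt : mid < hi := (PySem.Int.floordiv_lt_iff_lt_mul (by omega)).2 (by omega)
    have hmlen : mid.toNat < l.length := by omega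
    rw [PySem.List.pyGetD_eq_getElem _ _ (by omega) (by omega)] at hc
    refine ih (by omega) (by omega) hhi (fun i hilt => ?_) hinv2
    rw [List.getD_eq_getElem _ _ (by omega)]
    rcases Nat.lt_or_ge i mid.toNat with hless | hge
    · exact (hs' i mid.toNat (by omega) hmlen hless).trans_lt hc
    · have : i = mid.toNat := by omega
      subst this; exact hc
  | case2 lo hi h mid hc ih =>
    intro h0 hlh hhi hinv1 hinv2
    have hb : lo ≤ mid ∧ mid ≤ hi := PySem.Int.floordiv_two_mid_bounds (le_of_lt h)
    have hlt : mid < hi := (PySem.Int.floordiv_lt_iff_lt_mul (by omega)).2 (by omega)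
    have hmlen : mid.toNat < l.length := by omega
    rw [PySem.List.pyGetD_eq_getElem _ _ (by omega) (by omega)] at hc
    refine ih h0 (by omega) (by omega) hinv1 (fun i hge hil => ?_)
    rw [List.getD_eq_getElem _ _ hil]
    rcases Nat.lt_or_ge mid.toNat i with hless | hge2
    · intro hcon; exact hc ((hs' mid.toNat i hmlen hil hless).trans_lt hcon)
    · have : i = mid.toNat := by omega
      subst this; exact hc
  | case3 lo hi h =>
    intro h0 hlh hhi hinv1 hinv2
    have hlohi : lo = hi := by omega
    have := pv_countP_split (fun y => decide (y < x)) l lo.toNat (by omega)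
      (fun i hi2 => decide_eq_true (hinv1 i hi2))
      (fun i hge hil => by simpa using hinv2 i (by omega) hil)
    omega

-- ===== VERDICT (by name: the statement is the Claim_ definition above) =====
theorem insertion_sort_with_kth_position_spec : Claim_equal_insertion_sort_with_kth_position := by
  intro arr k _hdom _hpre
  unfold Spec_insertion_sort_with_kth_position
  unfold insertion_sort_with_kth_position insertion_sort_with_kth_position_alt
  cases hget : PySem.List.pyGet? arr k with
  | none => rfl
  | some kth =>
    simp only [PySem.List.len_eq, PySem.List.slice_zero_start]
    -- both equality counts are countP (· == kth) over arr[:k]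
    have hcnt : ∀ (l : List Int) (c : Int),
        l.foldl (fun c y => if y == kth then c + 1 else c) c
          = c + l.countP (fun y => y == kth) := by
      intro l c
      simpa using PySem.List.foldl_count_if (fun y => y == kth) l c
    have hlt : ∀ (l : List Int) (c : Int),
        l.foldl (fun c x => if x < kth then c + 1 else c) c
          = c + l.countP (fun x => decide (x < kth)) := by
      intro l c
      simpa using PySem.List.foldl_count_if (fun x => decide (x < kth)) l c
    rw [hcnt, hlt]
    -- A's insertion-sorted array is a permutation of arr
    have hperm : ((PySem.List.pyRange 1 (arr.length : Int) 1).foldl pvInsStep arr).Perm arr := by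
      refine pvInsFold_perm _ _ (fun i hi => ?_)
      have := (PySem.List.mem_pyRange_one).1 hi
      exact ⟨by omega, by omega⟩
    rw [hperm.countP_eq]
    -- B's binary search over the sorted array counts the elements below kth
    have hsort : (PySem.List.sorted arr id false).Pairwise (fun a b => a ≤ b) := by
      simpa using PySem.List.sorted_pairwise arr id
    have hbis : pvBisect (PySem.List.sorted arr id false) kth 0
        ((PySem.List.sorted arr id false).length : Int)
          = (PySem.List.sorted arr id false).countP (fun y => decide (y < kth)) := by
      refine pvBisect_eq_countP _ kth hsort 0 _ (by omega) (by omega) (by omega)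
        (fun i hi => by omega) (fun i h1 h2 => by omega)
    rw [hbis, (PySem.List.sorted_perm arr id false).countP_eq]
    -- B's count(kth) is the same countP
    rw [PySem.List.count_eq, List.count_eq_countP]
    ring
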